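-- pv_equiv track=rewrite | github.com/skrite0/friend-core | core.py | get_response_message
-- ===== SOURCE A (Python) =====
-- def get_response_message(bw_characters, date, user_exist):
--
--     formatted_string = ''
--
--     # Format each element as "<letter>-word"
--     if len(bw_characters) == 1:
--         # Handle single element
--         formatted_string = f"{bw_characters[0]}-word"
--     elif len(bw_characters) == 2:
--         # Handle exactly two elements
--         formatted_string = f"{bw_characters[0]}-word and the {bw_characters[1]}-word"
--     else:
--         # Handle three or more elements
--         formatted_string = ", ".join(f"{letter}-word" for letter in bw_characters[:-1])
--         formatted_string += f", and the {bw_characters[-1]}-word"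
--
--     if not user_exist and len(bw_characters) == 1:
--         return f"You've said the {formatted_string}. You are on CD. Your CD will end {date}"
--     elif not user_exist and len(bw_characters) > 1:
--         return f"You've used multiple abilities at once by saying the {formatted_string}. You are on a CD. Your CD will end {date}"
--     elif user_exist and len(bw_characters) == 1:
--         return f"**Repeat Offense** You've said the {formatted_string}. Your CD will be extended. Your CD will end {date}"
--     elif user_exist and len(bw_characters) > 1:
--         return f"**Repeat Offense** You've used multiple abilities at once by saying the {formatted_string}. Your CD will be extended. Your CD will end {date}"
-- ===== SOURCE B (Python) =====
-- def get_response_message(bw_characters, date, user_exist):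
--     # Single pass with an accumulator: each character contributes one piece
--     # (with its own leading separator), then everything is concatenated once.
--     n = len(bw_characters)
--     parts = []
--     for i, c in enumerate(bw_characters):
--         if i == 0:
--             parts.append(c + "-word")
--         elif i == n - 1:
--             parts.append((" and the " if n == 2 else ", and the ") + c + "-word")
--         else:
--             parts.append(", " + c + "-word")
--     fs = "".join(parts)
--     single = n == 1
--     body = ("You've said the " if single
--             else "You've used multiple abilities at once by saying the ") + fs
--     if user_exist:
--         msg = "**Repeat Offense** " + body + ". Your CD will be extended."
--     else:
--         msg = body + (". You are on CD." if single else ". You are on a CD.")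
--     return msg + " Your CD will end " + date
-- ===== Notes on version B (the rewrite author's own statement) =====
-- stated objective: alternative
-- what changed: B makes a single enumerate pass: each character contributes one piece (carrying its own leading separator, chosen from its position) to an accumulator list that is joined once, and the final message is assembled from shared prefix/body/clause parts instead of A's slice-plus-join with four complete literal return branches.
import Mathlib
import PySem

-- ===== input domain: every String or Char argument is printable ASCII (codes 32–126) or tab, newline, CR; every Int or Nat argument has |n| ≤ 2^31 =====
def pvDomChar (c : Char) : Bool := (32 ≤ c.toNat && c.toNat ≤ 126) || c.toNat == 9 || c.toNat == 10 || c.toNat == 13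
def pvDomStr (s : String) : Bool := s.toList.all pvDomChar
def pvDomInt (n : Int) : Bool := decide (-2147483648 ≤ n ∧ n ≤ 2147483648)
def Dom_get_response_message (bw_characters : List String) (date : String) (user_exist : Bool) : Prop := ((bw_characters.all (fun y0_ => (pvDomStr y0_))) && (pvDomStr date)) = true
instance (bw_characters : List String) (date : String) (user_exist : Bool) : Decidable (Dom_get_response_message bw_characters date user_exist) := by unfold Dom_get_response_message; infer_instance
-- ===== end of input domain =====

-- B builds the message in one enumerate pass: each character contributes one piece (with its own
-- leading separator) to an accumulator list that is concatenated once; simpler decomposition, same cost.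

-- ===== PORT A =====
def get_response_message (bw_characters : List String) (date : String) (user_exist : Bool) : Option String :=
  (if bw_characters.length == 1 then
     (PySem.List.pyGet? bw_characters 0).map (fun c0 => c0 ++ "-word")
   else if bw_characters.length == 2 then
     (PySem.List.pyGet? bw_characters 0).bind (fun c0 =>
       (PySem.List.pyGet? bw_characters 1).map (fun c1 =>
         c0 ++ "-word and the " ++ c1 ++ "-word"))
   else
     (PySem.List.pyGet? bw_characters (-1)).map (fun clast =>
       PySem.Str.join ", " ((PySem.List.slice bw_characters none (some (-1))).map (fun letter => letter ++ "-word"))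
         ++ ", and the " ++ clast ++ "-word")).bind
  (fun formatted_string =>
    if !user_exist && bw_characters.length == 1 then
      some ("You've said the " ++ formatted_string ++ ". You are on CD. Your CD will end " ++ date)
    else if !user_exist && bw_characters.length > 1 then
      some ("You've used multiple abilities at once by saying the " ++ formatted_string ++ ". You are on a CD. Your CD will end " ++ date)
    else if user_exist && bw_characters.length == 1 then
      some ("**Repeat Offense** You've said the " ++ formatted_string ++ ". Your CD will be extended. Your CD will end " ++ date)
    else if user_exist && bw_characters.length > 1 then
      some ("**Repeat Offense** You've used multiple abilities at once by saying the " ++ formatted_string ++ ". Your CD will be extended. Your CD will end " ++ date)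
    else none)

-- ===== PORT B =====
def get_response_message_alt (bw_characters : List String) (date : String) (user_exist : Bool) : Option String :=
  let n : Int := bw_characters.length
  let parts : List String :=
    (PySem.List.enumerate bw_characters).foldl (fun acc p =>
      if p.1 = 0 then acc ++ [p.2 ++ "-word"]
      else if p.1 = n - 1 then
        acc ++ [(if n = 2 then " and the " else ", and the ") ++ p.2 ++ "-word"]
      else acc ++ [", " ++ p.2 ++ "-word"]) []
  let fs := PySem.Str.join "" parts
  let single := bw_characters.length == 1
  let body := (if single then "You've said the "
               else "You've used multiple abilities at once by saying the ") ++ fs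
  let msg := if user_exist then "**Repeat Offense** " ++ body ++ ". Your CD will be extended."
             else body ++ (if single then ". You are on CD." else ". You are on a CD.")
  some (msg ++ " Your CD will end " ++ date)

-- ===== PRECONDITION & SPEC =====
-- Pre_ excludes only the empty list, on which A raises IndexError (bw_characters[-1]).
def Pre_get_response_message (bw_characters : List String) (date : String) (user_exist : Bool) : Prop := bw_characters ≠ []
instance (bw_characters : List String) (date : String) (user_exist : Bool) : Decidable (Pre_get_response_message bw_characters date user_exist) := by unfold Pre_get_response_message; infer_instance
def pvWitness_get_response_message : List String × String × Bool := (["a", "b"], "tomorrow", true)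

def Spec_get_response_message (bw_characters : List String) (date : String) (user_exist : Bool) (out : Option String) : Prop := out = get_response_message_alt bw_characters date user_exist
instance (bw_characters : List String) (date : String) (user_exist : Bool) (out : Option String) : Decidable (Spec_get_response_message bw_characters date user_exist out) := by unfold Spec_get_response_message; infer_instance

-- ===== CLAIM (what is proved, stated in full; the proofs are below) =====
def Claim_equal_get_response_message : Prop := ∀ (bw_characters : List String) (date : String) (user_exist : Bool), Dom_get_response_message bw_characters date user_exist → Pre_get_response_message bw_characters date user_exist → Spec_get_response_message bw_characters date user_exist (get_response_message bw_characters date user_exist)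
-- ===== LEMMAS AND PROOFS =====

-- B's middle pieces: over indices that are neither 0 nor n-1, the fold just appends ", "-prefixed pieces.
theorem pv_fold_mid (n : Int) : ∀ (ys : List String) (s : Int) (acc : List String),
    1 ≤ s → s + ys.length ≤ n - 1 →
    (PySem.List.enumerate ys s).foldl (fun acc p =>
      if p.1 = 0 then acc ++ [p.2 ++ "-word"]
      else if p.1 = n - 1 then
        acc ++ [(if n = 2 then " and the " else ", and the ") ++ p.2 ++ "-word"]
      else acc ++ [", " ++ p.2 ++ "-word"]) acc
      = acc ++ ys.map (fun c => ", " ++ c ++ "-word") := by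
  intro ys
  induction ys with
  | nil => intro s acc _ _; simp [PySem.List.enumerate_nil]
  | cons y ys ih =>
      intro s acc hs hb
      rw [PySem.List.enumerate_cons, List.foldl_cons]
      have h0 : ¬ (s = 0) := by omega
      have h1 : ¬ (s = n - 1) := by
        simp only [List.length_cons] at hb; push_cast at hb; omega
      rw [if_neg h0, if_neg h1, ih (s + 1) _ (by omega)
        (by simp only [List.length_cons] at hb; push_cast at hb ⊢; omega)]
      simp

-- A sep-prefixed head pulls the sep out of the join.
theorem pv_join_sep_head (sep p : List Char) (rest : List (List Char)) :
    PySem.Chars.join sep ((sep ++ p) :: rest) = sep ++ PySem.Chars.join sep (p :: rest) := by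
  cases rest with
  | nil => simp [PySem.Chars.join_singleton]
  | cons q rest => simp [PySem.Chars.join_cons_cons]

-- "".join of sep-prefixed pieces equals sep.join of the plain pieces.
theorem pv_join_from_pieces (sep w : List Char) : ∀ (mid : List (List Char)) (a : List Char),
    PySem.Chars.join [] ((a ++ w) :: mid.map (fun c => (sep ++ c) ++ w))
      = PySem.Chars.join sep ((a :: mid).map (fun c => c ++ w)) := by
  intro mid
  induction mid with
  | nil => intro a; simp [PySem.Chars.join_singleton]
  | cons b mid ih =>
      intro a
      rw [List.map_cons, PySem.Chars.join_cons_cons, ih (sep ++ b),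
        List.map_cons (f := fun c => c ++ w), List.append_assoc sep b w, pv_join_sep_head,
        List.map_cons, List.map_cons, PySem.Chars.join_cons_cons]
      simp

-- "".join splits over ++.
theorem pv_join_nil_append (ps : List (List Char)) (t : List Char) :
    PySem.Chars.join [] (ps ++ [t]) = PySem.Chars.join [] ps ++ t := by
  induction ps with
  | nil => simp [PySem.Chars.join_nil, PySem.Chars.join_singleton]
  | cons p ps ih =>
      cases ps with
      | nil => simp [PySem.Chars.join_singleton, PySem.Chars.join_cons_cons]
      | cons q ps =>
          simp only [List.cons_append, PySem.Chars.join_cons_cons, List.append_assoc,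
            List.nil_append] at ih ⊢
          simp [ih]

-- The formatted string assembled from pieces equals A's join-based one.
-- Same fact with the head exposed.
theorem pv_join_nil_append' (p : List Char) (ps : List (List Char)) (t : List Char) :
    PySem.Chars.join [] (p :: ps ++ [t]) = PySem.Chars.join [] (p :: ps) ++ t :=
  pv_join_nil_append (p :: ps) t

theorem pv_fs_eq (a z : String) (mid : List String) :
    PySem.Str.join "" ((a ++ "-word") :: mid.map (fun c => ", " ++ c ++ "-word") ++ [", and the " ++ z ++ "-word"])
      = PySem.Str.join ", " ((a :: mid).map (fun letter => letter ++ "-word")) ++ ", and the " ++ z ++ "-word" := by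
  rw [← String.toList_inj]
  simp only [PySem.Str.toList_join, String.toList_append, List.map_append, List.map_cons,
    List.map_nil, List.map_map, Function.comp_def]
  rw [show ("" : String).toList = ([] : List Char) from rfl]
  rw [show (fun x : String => ", ".toList ++ x.toList ++ "-word".toList)
        = ((fun c => (", ".toList ++ c) ++ "-word".toList) ∘ String.toList) from rfl, ← List.map_map]
  rw [show (fun x : String => x.toList ++ "-word".toList)
        = ((fun c => c ++ "-word".toList) ∘ String.toList) from rfl, ← List.map_map]
  rw [pv_join_nil_append', pv_join_from_pieces, List.map_cons]
  simp [List.append_assoc]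

-- ===== VERDICT (by name: the statement is the Claim_ definition above) =====
theorem get_response_message_spec : Claim_equal_get_response_message := by
  intro bw date ue _dom pre
  unfold Spec_get_response_message get_response_message get_response_message_alt
  match bw, pre with
  | [a], _ =>
      cases ue <;>
      · simp only [PySem.List.enumerate_cons, PySem.List.enumerate_nil, List.foldl_cons,
          List.foldl_nil, PySem.List.pyGet?, PySem.List.pyIdx?, List.length_cons,
          List.length_nil]
        simp [PySem.Str.toList_join, PySem.Chars.join_singleton, ← String.toList_inj,
          String.toList_append, List.append_assoc]
  | [a, b], _ =>
      cases ue <;>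
      · simp only [PySem.List.enumerate_cons, PySem.List.enumerate_nil, List.foldl_cons,
          List.foldl_nil, PySem.List.pyGet?, PySem.List.pyIdx?, List.length_cons,
          List.length_nil]
        simp [PySem.Str.toList_join, PySem.Chars.join_cons_cons, PySem.Chars.join_singleton,
          ← String.toList_inj, String.toList_append, List.append_assoc]
  | a :: b :: c :: rest, _ =>
      have htne : (b :: c :: rest : List String) ≠ [] := by simp
      have hsplit : (b :: c :: rest : List String).dropLast
          ++ [(b :: c :: rest).getLast htne] = b :: c :: rest :=
        List.dropLast_append_getLast htne
      set mid := (b :: c :: rest : List String).dropLast with hmid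
      set z := (b :: c :: rest).getLast htne with hz
      have hxs : (a :: b :: c :: rest : List String) = (a :: mid) ++ [z] := by
        rw [← hsplit]; rfl
      have hlmid : mid.length = rest.length + 1 := by
        have := congrArg List.length hsplit; simp at this; omega
      rw [hxs]
      have hfold : (PySem.List.enumerate ((a :: mid) ++ [z])).foldl (fun acc p =>
          if p.1 = 0 then acc ++ [p.2 ++ "-word"]
          else if p.1 = ((((a :: mid) ++ [z]).length : Int)) - 1 then
            acc ++ [(if ((((a :: mid) ++ [z]).length : Int)) = 2 then " and the " else ", and the ") ++ p.2 ++ "-word"]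
          else acc ++ [", " ++ p.2 ++ "-word"]) []
          = (a ++ "-word") :: mid.map (fun c => ", " ++ c ++ "-word") ++ [", and the " ++ z ++ "-word"] := by
        rw [show ((a :: mid) ++ [z] : List String) = a :: (mid ++ [z]) from rfl,
          PySem.List.enumerate_cons, List.foldl_cons, PySem.List.enumerate_append,
          List.foldl_append]
        rw [if_pos rfl]
        simp only [zero_add]
        rw [pv_fold_mid ((a :: (mid ++ [z])).length : Int) mid 1 _ (by omega)
          (by push_cast [List.length_cons, List.length_append, List.length_nil]; omega)]
        simp only [PySem.List.enumerate_cons, PySem.List.enumerate_nil, List.foldl_cons,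
          List.foldl_nil]
        have hidx : ¬ ((1 + (mid.length : Int)) = 0) := by omega
        have hidx2 : (1 + (mid.length : Int)) = ((a :: (mid ++ [z])).length : Int) - 1 := by
          push_cast [List.length_cons, List.length_append, List.length_nil]; omega
        have hn2 : ¬ (((a :: (mid ++ [z])).length : Int) = 2) := by
          push_cast [List.length_cons, List.length_append, List.length_nil]; omega
        rw [if_neg hidx, if_pos hidx2, if_neg hn2]
        simp
      have hlast : PySem.List.pyGet? ((a :: mid) ++ [z]) (-1) = some z := by
        rw [PySem.List.pyGet?_neg_one, List.getLast?_concat]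
      have hdrop : PySem.List.slice ((a :: mid) ++ [z]) none (some (-1)) = a :: mid := by
        rw [PySem.List.slice_to_neg_one, List.dropLast_concat]
      have hmidne : mid ≠ [] := by intro h; simp [h] at hlmid
      cases ue <;>
      · simp only [hfold, hlast, hdrop]
        rw [pv_fs_eq]
        simp [hmidne, Option.bind, ← String.toList_inj, String.toList_append,
          List.append_assoc]
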